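-- pv_equiv track=rewrite | github.com/rogeriolippert/Python | algoritmos/converter_dias_para_anos_meses_dias.py | converter_dias_para_anos_meses_dias
-- ===== SOURCE A (Python) =====
-- def converter_dias_para_anos_meses_dias(dias_totais):
--     dias = dias_totais
--     dias_por_mes = [31, 28, 31, 30, 31, 30, 31, 31, 30, 31, 30, 31]
--     dias_por_ano = 365
--
--     # calcular o número de anos
--     anos = dias // 365
--     dias_restantes = dias % 365
--
--     # calcular o número de meses e dias restantes
--     meses = 0
--     for i, dias_mes in enumerate(dias_por_mes):
--         if dias_restantes >= dias_mes:
--             meses += 1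
--             dias_restantes -= dias_mes
--         else:
--             break
--
--     # retornar o resultado fora do loop
--     return f"{dias_totais} dias correspondem a {anos} anos, {meses} meses e {dias_restantes} dias."
-- ===== SOURCE B (Python) =====
-- def converter_dias_para_anos_meses_dias(dias_totais):
--     dias_por_mes = [31, 28, 31, 30, 31, 30, 31, 31, 30, 31, 30, 31]
--     # cumulative (prefix-sum) table of the month lengths
--     cum = []
--     total = 0
--     for m in dias_por_mes:
--         total += m
--         cum.append(total)
--     anos = dias_totais // 365
--     r = dias_totais % 365
--     meses = sum(1 for c in cum if c <= r)
--     dias = r - (cum[meses - 1] if meses else 0)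
--     return f"{dias_totais} dias correspondem a {anos} anos, {meses} meses e {dias} dias."
-- ===== Notes on version B (the rewrite author's own statement) =====
-- stated objective: alternative
-- what changed: Replaces A's greedy subtract-and-break loop over month lengths by a precomputed cumulative (prefix-sum) table: meses is the count of prefix sums <= dias%365 and the remaining days are obtained by one subtraction of the cumulative total, instead of mutating the remainder month by month.
import Mathlib
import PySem

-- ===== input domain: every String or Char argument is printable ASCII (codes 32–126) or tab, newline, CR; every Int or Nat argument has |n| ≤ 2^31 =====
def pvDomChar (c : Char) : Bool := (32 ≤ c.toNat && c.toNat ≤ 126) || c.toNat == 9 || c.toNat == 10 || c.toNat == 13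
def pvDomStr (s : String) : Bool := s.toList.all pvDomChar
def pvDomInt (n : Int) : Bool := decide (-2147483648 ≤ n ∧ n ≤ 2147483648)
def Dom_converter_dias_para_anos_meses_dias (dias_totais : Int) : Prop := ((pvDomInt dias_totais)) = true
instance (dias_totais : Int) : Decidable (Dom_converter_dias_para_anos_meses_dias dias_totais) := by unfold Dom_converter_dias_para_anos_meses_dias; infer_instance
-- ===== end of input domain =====

-- B replaces A's greedy subtract-and-break loop by a prefix-sum table plus a count; same cost, alternative decomposition.

-- ===== PORT A =====
-- the for-loop with break: state (meses, dias_restantes), stops at the first month with dias_restantes < dias_mes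
def pvALoop : List Int → Int × Int → Int × Int
  | [], st => st
  | dias_mes :: rest, (meses, dias_restantes) =>
    if dias_restantes ≥ dias_mes then pvALoop rest (meses + 1, dias_restantes - dias_mes)
    else (meses, dias_restantes)

def converter_dias_para_anos_meses_dias (dias_totais : Int) : String :=
  let dias_por_mes : List Int := [31, 28, 31, 30, 31, 30, 31, 31, 30, 31, 30, 31]
  let anos := PySem.Int.floordiv dias_totais 365
  let dias_restantes := PySem.Int.mod dias_totais 365
  let st := pvALoop dias_por_mes (0, dias_restantes)
  PySem.Int.toStr dias_totais ++ " dias correspondem a " ++ PySem.Int.toStr anos ++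
    " anos, " ++ PySem.Int.toStr st.1 ++ " meses e " ++ PySem.Int.toStr st.2 ++ " dias."

-- ===== PORT B =====
def converter_dias_para_anos_meses_dias_alt (dias_totais : Int) : String :=
  let dias_por_mes : List Int := [31, 28, 31, 30, 31, 30, 31, 31, 30, 31, 30, 31]
  -- cumulative (prefix-sum) table, built as in Source B's accumulation loop
  let cum := (dias_por_mes.foldl (fun (p : List Int × Int) m => (p.1 ++ [p.2 + m], p.2 + m)) ([], 0)).1
  let anos := PySem.Int.floordiv dias_totais 365
  let r := PySem.Int.mod dias_totais 365
  let meses := cum.foldl (fun acc c => if c ≤ r then acc + 1 else acc) (0 : Int)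
  -- cum[meses-1]: meses ≤ 12 always, so the Python index never raises; getD 0 is unreachable
  let dias := r - (if meses ≠ 0 then (PySem.List.pyGet? cum (meses - 1)).getD 0 else 0)
  PySem.Int.toStr dias_totais ++ " dias correspondem a " ++ PySem.Int.toStr anos ++
    " anos, " ++ PySem.Int.toStr meses ++ " meses e " ++ PySem.Int.toStr dias ++ " dias."

-- ===== PRECONDITION & SPEC =====
def Spec_converter_dias_para_anos_meses_dias (dias_totais : Int) (out : String) : Prop := out = converter_dias_para_anos_meses_dias_alt dias_totais
instance (dias_totais : Int) (out : String) : Decidable (Spec_converter_dias_para_anos_meses_dias dias_totais out) := by unfold Spec_converter_dias_para_anos_meses_dias; infer_instance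

-- ===== CLAIM (what is proved, stated in full; the proofs are below) =====
def Claim_equal_converter_dias_para_anos_meses_dias : Prop := ∀ (dias_totais : Int), Dom_converter_dias_para_anos_meses_dias dias_totais → Spec_converter_dias_para_anos_meses_dias dias_totais (converter_dias_para_anos_meses_dias dias_totais)

-- ===== LEMMAS AND PROOFS =====
set_option maxRecDepth 4000
-- both month computations, as a function of the remainder r (B's side written exactly as the
-- zeta-reduced body of the alt port)
theorem pv_keyNat : ∀ n : Nat, n < 365 →
    pvALoop [31, 28, 31, 30, 31, 30, 31, 31, 30, 31, 30, 31] (0, (n : Int)) =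
      ((([31, 28, 31, 30, 31, 30, 31, 31, 30, 31, 30, 31] : List Int).foldl
          (fun (p : List Int × Int) m => (p.1 ++ [p.2 + m], p.2 + m)) ([], 0)).1.foldl
          (fun acc c => if c ≤ (n : Int) then acc + 1 else acc) (0 : Int),
       (n : Int) -
         (if (([31, 28, 31, 30, 31, 30, 31, 31, 30, 31, 30, 31] : List Int).foldl
              (fun (p : List Int × Int) m => (p.1 ++ [p.2 + m], p.2 + m)) ([], 0)).1.foldl
              (fun acc c => if c ≤ (n : Int) then acc + 1 else acc) (0 : Int) ≠ 0 then
            (PySem.List.pyGet?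
              (([31, 28, 31, 30, 31, 30, 31, 31, 30, 31, 30, 31] : List Int).foldl
                (fun (p : List Int × Int) m => (p.1 ++ [p.2 + m], p.2 + m)) ([], 0)).1
              ((([31, 28, 31, 30, 31, 30, 31, 31, 30, 31, 30, 31] : List Int).foldl
                  (fun (p : List Int × Int) m => (p.1 ++ [p.2 + m], p.2 + m)) ([], 0)).1.foldl
                  (fun acc c => if c ≤ (n : Int) then acc + 1 else acc) (0 : Int) - 1)).getD 0
          else 0)) := by decide

theorem pv_key (r : Int) (h0 : 0 ≤ r) (h1 : r < 365) :
    pvALoop [31, 28, 31, 30, 31, 30, 31, 31, 30, 31, 30, 31] (0, r) =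
      ((([31, 28, 31, 30, 31, 30, 31, 31, 30, 31, 30, 31] : List Int).foldl
          (fun (p : List Int × Int) m => (p.1 ++ [p.2 + m], p.2 + m)) ([], 0)).1.foldl
          (fun acc c => if c ≤ r then acc + 1 else acc) (0 : Int),
       r -
         (if (([31, 28, 31, 30, 31, 30, 31, 31, 30, 31, 30, 31] : List Int).foldl
              (fun (p : List Int × Int) m => (p.1 ++ [p.2 + m], p.2 + m)) ([], 0)).1.foldl
              (fun acc c => if c ≤ r then acc + 1 else acc) (0 : Int) ≠ 0 then
            (PySem.List.pyGet?
              (([31, 28, 31, 30, 31, 30, 31, 31, 30, 31, 30, 31] : List Int).foldl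
                (fun (p : List Int × Int) m => (p.1 ++ [p.2 + m], p.2 + m)) ([], 0)).1
              ((([31, 28, 31, 30, 31, 30, 31, 31, 30, 31, 30, 31] : List Int).foldl
                  (fun (p : List Int × Int) m => (p.1 ++ [p.2 + m], p.2 + m)) ([], 0)).1.foldl
                  (fun acc c => if c ≤ r then acc + 1 else acc) (0 : Int) - 1)).getD 0
          else 0)) := by
  have h := pv_keyNat r.toNat (by omega)
  rwa [Int.toNat_of_nonneg h0] at h

-- ===== VERDICT (by name: the statement is the Claim_ definition above) =====
theorem converter_dias_para_anos_meses_dias_spec : Claim_equal_converter_dias_para_anos_meses_dias := by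
  intro d _
  unfold Spec_converter_dias_para_anos_meses_dias
  simp only [converter_dias_para_anos_meses_dias, converter_dias_para_anos_meses_dias_alt]
  have h0 : 0 ≤ PySem.Int.mod d 365 := by
    rw [PySem.Int.mod_eq_emod_of_pos (by norm_num)]; exact Int.emod_nonneg d (by norm_num)
  have h1 : PySem.Int.mod d 365 < 365 := by
    rw [PySem.Int.mod_eq_emod_of_pos (by norm_num)]; exact Int.emod_lt_of_pos d (by norm_num)
  rw [pv_key (PySem.Int.mod d 365) h0 h1]
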